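-- pv_equiv track=rewrite | github.com/vinchinzu/euler | python/355.py | _compute_compatibility
-- ===== SOURCE A (Python) =====
-- from typing import Dict, List, Sequence, Tuple
--
-- def _compute_compatibility(signatures: List[Tuple[int, ...]]) -> List[List[bool]]:
--     """Precompute compatibility between signatures.
--
--     Two signatures are compatible if they share no common prime factors.
--     """
--
--     num_groups = len(signatures)
--     compatible: List[List[bool]] = [
--         [False] * num_groups for _ in range(num_groups)
--     ]
--
--     for i in range(num_groups):
--         compatible[i][i] = True
--         sig_i = signatures[i]
--         set_i = set(sig_i)
--         for j in range(i + 1, num_groups):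
--             sig_j = signatures[j]
--             # They are compatible if there is no shared prime.
--             compat = set_i.isdisjoint(sig_j)
--             compatible[i][j] = compat
--             compatible[j][i] = compat
--
--     return compatible
-- ===== SOURCE B (Python) =====
-- def _compute_compatibility(signatures):
--     """Precompute compatibility between signatures via an inverted prime index.
--
--     Two signatures are compatible if they share no common prime factors.
--     """
--     num_groups = len(signatures)
--     index = {}
--     for i, sig in enumerate(signatures):
--         for p in set(sig):
--             index.setdefault(p, []).append(i)
--     compatible = [[True] * num_groups for _ in range(num_groups)]
--     for idxs in index.values():
--         for a in idxs:
--             for b in idxs: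
--                 if a != b:
--                     compatible[a][b] = False
--     return compatible
-- ===== Notes on version B (the rewrite author's own statement) =====
-- stated objective: alternative
-- what changed: Replaces A's upper-triangle pairwise set_i.isdisjoint(sig_j) scan by an inverted prime-to-indices index: the matrix starts all True and exactly the pairs of distinct indices listed under a shared prime are cleared to False.
import Mathlib
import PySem

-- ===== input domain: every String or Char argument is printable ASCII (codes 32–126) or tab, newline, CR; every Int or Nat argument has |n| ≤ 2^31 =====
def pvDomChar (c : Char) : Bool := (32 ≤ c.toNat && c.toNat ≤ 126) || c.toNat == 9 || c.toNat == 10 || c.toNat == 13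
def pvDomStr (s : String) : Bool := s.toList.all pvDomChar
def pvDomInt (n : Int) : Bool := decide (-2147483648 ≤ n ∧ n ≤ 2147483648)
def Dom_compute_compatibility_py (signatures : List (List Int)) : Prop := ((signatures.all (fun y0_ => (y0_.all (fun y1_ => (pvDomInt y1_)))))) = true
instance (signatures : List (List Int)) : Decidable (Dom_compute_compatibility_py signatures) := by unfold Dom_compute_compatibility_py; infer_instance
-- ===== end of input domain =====

-- B replaces A's pairwise isdisjoint scan over the upper triangle by an inverted
-- prime→indices index: start from an all-True matrix and clear exactly the pairs of
-- distinct indices that share a prime (objective: alternative decomposition).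

-- ===== PORT A =====
-- literal transliteration of A: all-False matrix, then for each i set the diagonal
-- and fill row/column i for j in range(i+1, n) with set_i.isdisjoint(sig_j).
def compute_compatibility_py (signatures : List (List Int)) : List (List Bool) :=
  let num_groups := signatures.length
  let init := List.replicate num_groups (List.replicate num_groups false)
  (List.range num_groups).foldl
    (fun m i =>
      let m1 := m.set i ((m.getD i []).set i true)
      let set_i := PySem.Set.ofList (signatures.getD i [])
      (List.range' (i + 1) (num_groups - (i + 1))).foldl
        (fun m j =>
          let compat := PySem.Set.isdisjoint set_i (signatures.getD j [])
          let m2 := m.set i ((m.getD i []).set j compat)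
          m2.set j ((m2.getD j []).set i compat))
        m1)
    init

-- ===== PORT B =====
-- literal transliteration of B (Source B): build index = {prime: [indices]}, start from an
-- all-True matrix, and set compatible[a][b] = False for distinct a, b sharing a prime.
def compute_compatibility_py_alt (signatures : List (List Int)) : List (List Bool) :=
  let num_groups := signatures.length
  let index : PySem.Dict Int (List Nat) :=
    signatures.zipIdx.foldl
      (fun d si => (PySem.Set.ofList si.1).foldl (fun d p => d.modify p [] (· ++ [si.2])) d)
      PySem.Dict.empty
  let init := List.replicate num_groups (List.replicate num_groups true)
  index.values.foldl
    (fun m idxs =>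
      idxs.foldl
        (fun m a =>
          idxs.foldl
            (fun m b => if a ≠ b then m.set a ((m.getD a []).set b false) else m)
            m)
        m)
    init

-- ===== PRECONDITION & SPEC =====
def Spec_compute_compatibility_py (signatures : List (List Int)) (out : List (List Bool)) : Prop := out = compute_compatibility_py_alt signatures
instance (signatures : List (List Int)) (out : List (List Bool)) : Decidable (Spec_compute_compatibility_py signatures out) := by unfold Spec_compute_compatibility_py; infer_instance

-- ===== CLAIM (what is proved, stated in full; the proofs are below) =====
def Claim_equal_compute_compatibility_py : Prop := ∀ (signatures : List (List Int)), Dom_compute_compatibility_py signatures → Spec_compute_compatibility_py signatures (compute_compatibility_py signatures)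

-- ===== LEMMAS AND PROOFS =====

-- the value both programs compute at position (x, y)
def pvTgt (signatures : List (List Int)) (x y : Nat) : Bool :=
  x == y || PySem.Set.isdisjoint (PySem.Set.ofList (signatures.getD x [])) (signatures.getD y [])

-- matrix entry and single-entry update
def pvE (m : List (List Bool)) (x y : Nat) : Bool := (m.getD x []).getD y false

def pvUpd (m : List (List Bool)) (a b : Nat) (v : Bool) : List (List Bool) :=
  m.set a ((m.getD a []).set b v)

-- squareness invariant
def pvSq (n : Nat) (m : List (List Bool)) : Prop := m.length = n ∧ ∀ row ∈ m, row.length = n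

lemma pvTgt_iff (signatures : List (List Int)) (x y : Nat) :
    pvTgt signatures x y = true ↔
      (x = y ∨ ∀ p ∈ signatures.getD x [], p ∉ signatures.getD y []) := by
  simp [pvTgt, PySem.Set.isdisjoint_iff, PySem.Set.mem_ofList]

lemma pvTgt_symm (signatures : List (List Int)) (x y : Nat) :
    pvTgt signatures x y = pvTgt signatures y x := by
  rw [Bool.eq_iff_iff, pvTgt_iff, pvTgt_iff]
  constructor
  · rintro (h | h)
    · exact Or.inl (Eq.symm h)
    · exact Or.inr fun p hp hq => h p hq hp
  · rintro (h | h)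
    · exact Or.inl (Eq.symm h)
    · exact Or.inr fun p hp hq => h p hq hp

lemma pvSq_upd (n : Nat) (m : List (List Bool)) (a b : Nat) (v : Bool)
    (h : pvSq n m) (ha : a < n) : pvSq n (pvUpd m a b v) := by
  obtain ⟨hl, hr⟩ := h
  refine ⟨by simp [pvUpd, hl], ?_⟩
  intro row hrow
  rcases List.mem_or_eq_of_mem_set hrow with h1 | h1
  · exact hr row h1
  · subst h1
    have : m.getD a [] = m[a] := List.getD_eq_getElem m [] (by omega)
    rw [this, List.length_set]
    exact hr _ (List.getElem_mem (by omega))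

lemma pvE_upd (n : Nat) (m : List (List Bool)) (a b : Nat) (v : Bool)
    (hsq : pvSq n m) (ha : a < n) (hb : b < n) (x y : Nat) :
    pvE (pvUpd m a b v) x y = if x = a ∧ y = b then v else pvE m x y := by
  obtain ⟨hl, hr⟩ := hsq
  have hlen : (m.getD a []).length = n := by
    rw [List.getD_eq_getElem m [] (by omega)]
    exact hr _ (List.getElem_mem (by omega))
  have hrow : ∀ z, (pvUpd m a b v).getD z [] =
      if z = a then (m.getD a []).set b v else m.getD z [] := by
    intro z
    unfold pvUpd
    by_cases hz : z = a
    · subst hz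
      rw [if_pos rfl, List.getD_eq_getElem?_getD, List.getElem?_set, if_pos rfl,
        if_pos (by omega)]
      rfl
    · rw [if_neg hz, List.getD_eq_getElem?_getD, List.getElem?_set,
        if_neg (fun h => hz (Eq.symm h))]
      exact List.getD_eq_getElem?_getD.symm
  unfold pvE
  rw [hrow x]
  by_cases hx : x = a
  · rw [if_pos hx]
    by_cases hy : y = b
    · subst hy
      rw [if_pos ⟨hx, rfl⟩, List.getD_eq_getElem?_getD, List.getElem?_set, if_pos rfl,
        if_pos (by omega)]
      rfl
    · rw [if_neg (fun h => hy h.2), List.getD_eq_getElem?_getD, List.getElem?_set,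
        if_neg (fun h => hy (Eq.symm h)), hx]
      exact List.getD_eq_getElem?_getD.symm
  · rw [if_neg hx, if_neg (fun h => hx h.1)]

-- ---------- B side ----------

-- the flattened (prime, index) pair list B's dict is built from
def pvPairs (signatures : List (List Int)) : List (Int × Nat) :=
  signatures.zipIdx.flatMap (fun si => (PySem.Set.ofList si.1).map (fun p => (p, si.2)))

def pvIndex (signatures : List (List Int)) : PySem.Dict Int (List Nat) :=
  signatures.zipIdx.foldl
    (fun d si => (PySem.Set.ofList si.1).foldl (fun d p => d.modify p [] (· ++ [si.2])) d)
    PySem.Dict.empty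

lemma pvIndex_eq_foldl_pairs (signatures : List (List Int)) :
    pvIndex signatures =
      (pvPairs signatures).foldl (fun d p => d.modify p.1 [] (· ++ [p.2])) PySem.Dict.empty := by
  rw [pvPairs, List.foldl_flatMap]
  simp [pvIndex, List.foldl_map]

lemma pvIndex_getD (signatures : List (List Int)) (c : Int) :
    (pvIndex signatures).getD c [] =
      ((pvPairs signatures).filter (fun p => p.1 == c)).map (·.2) := by
  rw [pvIndex_eq_foldl_pairs]
  simpa using PySem.Dict.getD_foldl_modify_append (pvPairs signatures) PySem.Dict.empty c

lemma pvIndex_nodup_keys (signatures : List (List Int)) :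
    (pvIndex signatures).keys.Nodup := by
  rw [pvIndex_eq_foldl_pairs]
  exact PySem.Dict.nodup_keys_foldl_modify_key (pvPairs signatures) Prod.fst []
    (fun _ p l => l ++ [p.2]) PySem.Dict.empty PySem.Dict.nodup_keys_empty

lemma mem_pvPairs (signatures : List (List Int)) (p : Int) (i : Nat) :
    (p, i) ∈ pvPairs signatures ↔ ∃ h : i < signatures.length, p ∈ signatures[i] := by
  simp only [pvPairs, List.mem_flatMap, List.mem_map]
  constructor
  · rintro ⟨⟨sig, k⟩, hmem, q, hq, he⟩
    obtain ⟨h1, h2⟩ := Prod.mk.injEq .. ▸ he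
    have := List.mem_zipIdx hmem
    refine ⟨by omega, ?_⟩
    have hsig : sig = signatures[i] := by
      have := this.2.2; simpa [← h2] using this
    rw [← hsig]
    rw [PySem.Set.mem_ofList] at hq
    rwa [← h1]
  · rintro ⟨h, hp⟩
    refine ⟨(signatures[i], i), ?_, p, ?_, rfl⟩
    · exact List.mk_mem_zipIdx_iff_getElem?.2 (List.getElem?_eq_getElem h)
    · rwa [PySem.Set.mem_ofList]

lemma mem_pvIndex_getD (signatures : List (List Int)) (c : Int) (i : Nat) :
    i ∈ (pvIndex signatures).getD c [] ↔
      ∃ h : i < signatures.length, c ∈ signatures[i] := by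
  rw [pvIndex_getD]
  simp only [List.mem_map, List.mem_filter]
  constructor
  · rintro ⟨⟨p, j⟩, ⟨hmem, hpc⟩, he⟩
    simp only at he
    subst he
    have : p = c := by simpa using hpc
    subst this
    exact (mem_pvPairs _ _ _).1 hmem
  · intro h
    exact ⟨(c, i), ⟨(mem_pvPairs _ _ _).2 h, by simp⟩, rfl⟩

-- a shared prime between signatures x and y, both indices in range
def pvShare (signatures : List (List Int)) (x y : Nat) : Prop :=
  ∃ l ∈ (pvIndex signatures).values, x ∈ l ∧ y ∈ l

lemma pvShare_iff (signatures : List (List Int)) (x y : Nat) :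
    pvShare signatures x y ↔
      (∃ (hx : x < signatures.length) (hy : y < signatures.length) (p : Int),
        p ∈ signatures[x] ∧ p ∈ signatures[y]) := by
  constructor
  · rintro ⟨l, hl, hx, hy⟩
    simp only [PySem.Dict.values, List.mem_map] at hl
    obtain ⟨q, hmem, he⟩ := hl
    subst he
    have hget : (pvIndex signatures).get? q.1 = some q.2 :=
      PySem.Dict.get?_of_mem_items _ hmem (pvIndex_nodup_keys _)
    have hgd : (pvIndex signatures).getD q.1 [] = q.2 :=
      PySem.Dict.getD_of_get?_eq_some _ [] hget
    rw [← hgd] at hx hy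
    obtain ⟨h1, hp1⟩ := (mem_pvIndex_getD _ _ _).1 hx
    obtain ⟨h2, hp2⟩ := (mem_pvIndex_getD _ _ _).1 hy
    exact ⟨h1, h2, q.1, hp1, hp2⟩
  · rintro ⟨hx, hy, p, hp1, hp2⟩
    have hxm : x ∈ (pvIndex signatures).getD p [] := (mem_pvIndex_getD _ _ _).2 ⟨hx, hp1⟩
    have hne : (pvIndex signatures).getD p [] ≠ [] := by
      intro h; rw [h] at hxm; exact absurd hxm (List.not_mem_nil)
    have hget : (pvIndex signatures).get? p = some ((pvIndex signatures).getD p []) := by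
      rcases h : (pvIndex signatures).get? p with _ | l
      · exact absurd (PySem.Dict.getD_of_get?_eq_none _ [] h) hne
      · rw [PySem.Dict.getD_of_get?_eq_some _ [] h]
    refine ⟨(pvIndex signatures).getD p [], ?_, hxm, (mem_pvIndex_getD _ _ _).2 ⟨hy, hp2⟩⟩
    simp only [PySem.Dict.values, List.mem_map]
    exact ⟨(p, (pvIndex signatures).getD p []),
      PySem.Dict.mem_items_of_get?_eq_some _ hget, rfl⟩

-- the single clearing step of B's pair loop
def pvClr (m : List (List Bool)) (a b : Nat) : List (List Bool) :=
  if a ≠ b then pvUpd m a b false else m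

lemma pvB_pairfold (n : Nat) :
    ∀ (P : List (Nat × Nat)) (m : List (List Bool)),
      pvSq n m → (∀ p ∈ P, p.1 < n ∧ p.2 < n) →
      pvSq n (P.foldl (fun m p => pvClr m p.1 p.2) m) ∧
      ∀ x y, x < n → y < n →
        pvE (P.foldl (fun m p => pvClr m p.1 p.2) m) x y =
          if (x, y) ∈ P ∧ x ≠ y then false else pvE m x y := by
  intro P
  induction P with
  | nil =>
    intro m hsq _
    refine ⟨hsq, ?_⟩
    intro x y _ _
    simp
  | cons p P ih =>
    rcases p with ⟨a, b⟩
    intro m hsq hP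
    have hp := hP (a, b) (List.mem_cons_self)
    have hsq' : pvSq n (pvClr m a b) := by
      unfold pvClr; split
      · exact pvSq_upd n m a b false hsq hp.1
      · exact hsq
    obtain ⟨ih1, ih2⟩ := ih (pvClr m a b) hsq' (fun q hq => hP q (List.mem_cons_of_mem _ hq))
    refine ⟨by simpa using ih1, ?_⟩
    intro x y hx hy
    rw [List.foldl_cons]
    rw [show pvClr m (a, b).1 (a, b).2 = pvClr m a b from rfl] at ih2 ⊢
    rw [ih2 x y hx hy]
    by_cases h1 : (x, y) ∈ P ∧ x ≠ y
    · rw [if_pos h1, if_pos ⟨List.mem_cons_of_mem _ h1.1, h1.2⟩]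
    · rw [if_neg h1]
      have hclr : pvE (pvClr m a b) x y =
          if x = a ∧ y = b ∧ a ≠ b then false else pvE m x y := by
        unfold pvClr
        by_cases hab : a ≠ b
        · rw [if_pos hab, pvE_upd n m a b false hsq hp.1 hp.2 x y]
          by_cases h2 : x = a ∧ y = b
          · rw [if_pos h2, if_pos ⟨h2.1, h2.2, hab⟩]
          · rw [if_neg h2, if_neg (fun h => h2 ⟨h.1, h.2.1⟩)]
        · rw [if_neg hab, if_neg (fun h => hab h.2.2)]
      rw [hclr]
      by_cases h3 : x = a ∧ y = b ∧ a ≠ b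
      · have hxy : (x, y) = (a, b) := by rw [h3.1, h3.2.1]
        have hne : x ≠ y := by rw [h3.1, h3.2.1]; exact h3.2.2
        rw [if_pos h3, if_pos ⟨List.mem_cons.2 (Or.inl hxy), hne⟩]
      · rw [if_neg h3, if_neg ?_]
        rintro ⟨hm, hne⟩
        rcases List.mem_cons.1 hm with he | hm'
        · have e1 : x = a := congrArg Prod.fst he
          have e2 : y = b := congrArg Prod.snd he
          exact h3 ⟨e1, e2, by rw [← e1, ← e2]; exact hne⟩
        · exact h1 ⟨hm', hne⟩

-- B's triple loop is the pair loop over the flattened pair list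
def pvBPairs (signatures : List (List Int)) : List (Nat × Nat) :=
  (pvIndex signatures).values.flatMap (fun l => l.flatMap (fun a => l.map (fun b => (a, b))))

lemma pvTriple_eq (l : List Nat) (m : List (List Bool)) :
    l.foldl (fun m a => l.foldl (fun m b => pvClr m a b) m) m =
      (l.flatMap (fun a => l.map (fun b => (a, b)))).foldl (fun m p => pvClr m p.1 p.2) m := by
  rw [List.foldl_flatMap]
  congr 1
  funext m' a
  rw [List.foldl_map]

lemma pvB_eq_pairfold (signatures : List (List Int)) :
    compute_compatibility_py_alt signatures =
      (pvBPairs signatures).foldl (fun m p => pvClr m p.1 p.2)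
        (List.replicate signatures.length (List.replicate signatures.length true)) := by
  have h1 : compute_compatibility_py_alt signatures =
      (pvIndex signatures).values.foldl
        (fun m idxs => idxs.foldl (fun m a => idxs.foldl (fun m b => pvClr m a b) m) m)
        (List.replicate signatures.length (List.replicate signatures.length true)) := rfl
  rw [h1, pvBPairs, List.foldl_flatMap]
  congr 1
  funext m l
  exact pvTriple_eq l m

lemma mem_pvBPairs (signatures : List (List Int)) (x y : Nat) :
    (x, y) ∈ pvBPairs signatures ↔ pvShare signatures x y := by
  simp only [pvBPairs, pvShare, List.mem_flatMap, List.mem_map]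
  constructor
  · rintro ⟨l, hl, a, ha, b, hb, he⟩
    obtain ⟨e1, e2⟩ := Prod.mk.injEq .. ▸ he
    exact ⟨l, hl, e1 ▸ ha, e2 ▸ hb⟩
  · rintro ⟨l, hl, hx, hy⟩
    exact ⟨l, hl, x, hx, y, hy, rfl⟩

lemma pvBPairs_lt (signatures : List (List Int)) :
    ∀ p ∈ pvBPairs signatures, p.1 < signatures.length ∧ p.2 < signatures.length := by
  rintro ⟨x, y⟩ hp
  rw [mem_pvBPairs, pvShare_iff] at hp
  obtain ⟨hx, hy, _⟩ := hp
  exact ⟨hx, hy⟩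

lemma pvB_char (signatures : List (List Int)) :
    pvSq signatures.length (compute_compatibility_py_alt signatures) ∧
    ∀ x y, x < signatures.length → y < signatures.length →
      pvE (compute_compatibility_py_alt signatures) x y = pvTgt signatures x y := by
  have hsq0 : pvSq signatures.length
      (List.replicate signatures.length (List.replicate signatures.length true)) := by
    constructor
    · simp
    · intro row hrow
      rw [List.eq_of_mem_replicate hrow]; simp
  obtain ⟨h1, h2⟩ := pvB_pairfold signatures.length (pvBPairs signatures) _
    hsq0 (pvBPairs_lt signatures)
  rw [← pvB_eq_pairfold] at h1 h2
  refine ⟨h1, ?_⟩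
  intro x y hx hy
  rw [h2 x y hx hy]
  have hInit : pvE (List.replicate signatures.length (List.replicate signatures.length true)) x y
      = true := by
    simp [pvE, List.getD_eq_getElem?_getD, hx, hy]
  by_cases h : (x, y) ∈ pvBPairs signatures ∧ x ≠ y
  · rw [if_pos h]
    have := (mem_pvBPairs _ _ _).1 h.1
    rw [pvShare_iff] at this
    obtain ⟨_, _, p, hp1, hp2⟩ := this
    have : ¬ pvTgt signatures x y = true := by
      rw [pvTgt_iff]
      push Not
      refine ⟨h.2, p, ?_, ?_⟩
      · rwa [List.getD_eq_getElem _ _ hx]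
      · rw [List.getD_eq_getElem _ _ hy]; exact hp2
    simp [Bool.not_eq_true] at this
    rw [this]
  · rw [if_neg h, hInit]
    symm
    rw [pvTgt_iff]
    by_cases hxy : x = y
    · exact Or.inl hxy
    · right
      intro p hp hq
      apply h
      refine ⟨(mem_pvBPairs _ _ _).2 ?_, hxy⟩
      rw [pvShare_iff]
      refine ⟨hx, hy, p, ?_, ?_⟩
      · rwa [List.getD_eq_getElem _ _ hx] at hp
      · rwa [List.getD_eq_getElem _ _ hy] at hq
  -- (end pvB_char)

-- ---------- A side ----------

def pvCmp (signatures : List (List Int)) (i j : Nat) : Bool :=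
  PySem.Set.isdisjoint (PySem.Set.ofList (signatures.getD i [])) (signatures.getD j [])

def pvAStep (signatures : List (List Int)) (i : Nat) (m : List (List Bool)) (j : Nat) :
    List (List Bool) :=
  pvUpd (pvUpd m i j (pvCmp signatures i j)) j i (pvCmp signatures i j)

def pvAOuter (signatures : List (List Int)) (m : List (List Bool)) (i : Nat) :
    List (List Bool) :=
  (List.range' (i + 1) (signatures.length - (i + 1))).foldl (pvAStep signatures i)
    (pvUpd m i i true)

-- A's port is definitionally this fold (the lets zeta-reduce to pvUpd/pvCmp)
lemma pvA_eq_fold (signatures : List (List Int)) :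
    compute_compatibility_py signatures =
      (List.range signatures.length).foldl (pvAOuter signatures)
        (List.replicate signatures.length (List.replicate signatures.length false)) := rfl

lemma pvA_inner (n : Nat) (signatures : List (List Int)) (i : Nat) (hi : i < n) :
    ∀ (J : List Nat) (m : List (List Bool)),
      pvSq n m → (∀ j ∈ J, i < j ∧ j < n) →
      pvSq n (J.foldl (pvAStep signatures i) m) ∧
      ∀ x y, x < n → y < n →
        pvE (J.foldl (pvAStep signatures i) m) x y =
          if x = i ∧ y ∈ J then pvTgt signatures i y
          else if y = i ∧ x ∈ J then pvTgt signatures x i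
          else pvE m x y := by
  intro J
  induction J with
  | nil =>
    intro m hsq _
    refine ⟨hsq, ?_⟩
    intro x y _ _
    simp
  | cons j J ih =>
    intro m hsq hJ
    have hj := hJ j (List.mem_cons_self)
    have hij : i ≠ j := by omega
    set c := pvCmp signatures i j with hc
    have hcij : c = pvTgt signatures i j := by
      simp [pvTgt, pvCmp, hc, (by omega : ¬ i = j)]
    have hsq1 : pvSq n (pvUpd (pvUpd m i j c) j i c) :=
      pvSq_upd n _ j i c (pvSq_upd n m i j c hsq hi) (by omega)
    obtain ⟨ih1, ih2⟩ := ih (pvUpd (pvUpd m i j c) j i c) hsq1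
      (fun k hk => hJ k (List.mem_cons_of_mem _ hk))
    rw [List.foldl_cons,
      show pvAStep signatures i m j = pvUpd (pvUpd m i j c) j i c from rfl]
    refine ⟨ih1, ?_⟩
    intro x y hx hy
    rw [ih2 x y hx hy]
    have he : pvE (pvUpd (pvUpd m i j c) j i c) x y =
        if x = j ∧ y = i then c else if x = i ∧ y = j then c else pvE m x y := by
      rw [pvE_upd n _ j i c (pvSq_upd n m i j c hsq hi) (by omega) hi x y,
        pvE_upd n m i j c hsq hi (by omega) x y]
    rw [he]
    by_cases h1 : x = i ∧ y ∈ J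
    · have : x = i ∧ y ∈ j :: J := ⟨h1.1, List.mem_cons_of_mem _ h1.2⟩
      simp only [if_pos h1, if_pos this]
    · by_cases h2 : y = i ∧ x ∈ J
      · have hxi : ¬ (x = i) := by
          intro hxi
          have := hJ x (List.mem_cons_of_mem _ h2.2)
          omega
        have : ¬ (x = i ∧ y ∈ j :: J) := fun h => hxi h.1
        simp only [if_neg h1, if_pos h2, if_neg this,
          if_pos (⟨h2.1, List.mem_cons_of_mem _ h2.2⟩ : y = i ∧ x ∈ j :: J)]
      · simp only [if_neg h1, if_neg h2]
        by_cases h3 : x = i ∧ y = j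
        · have : x = i ∧ y ∈ j :: J := ⟨h3.1, List.mem_cons.2 (Or.inl h3.2)⟩
          have hnji : ¬ (x = j ∧ y = i) := by
            rintro ⟨e1, _⟩; rw [h3.1] at e1; exact hij e1
          simp only [if_pos this, if_neg hnji, if_pos h3]
          rw [hcij, h3.2]
        · by_cases h4 : x = j ∧ y = i
          · have : y = i ∧ x ∈ j :: J := ⟨h4.2, List.mem_cons.2 (Or.inl h4.1)⟩
            have hnxi : ¬ (x = i ∧ y ∈ j :: J) := by
              rintro ⟨e1, _⟩; rw [h4.1] at e1; exact hij e1.symm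
            simp only [if_neg hnxi, if_pos this, if_pos h4]
            rw [hcij, h4.1, pvTgt_symm]
          · have hn1 : ¬ (x = i ∧ y ∈ j :: J) := by
              rintro ⟨e1, hm⟩
              rcases List.mem_cons.1 hm with he' | hm'
              · exact h3 ⟨e1, he'⟩
              · exact h1 ⟨e1, hm'⟩
            have hn2 : ¬ (y = i ∧ x ∈ j :: J) := by
              rintro ⟨e1, hm⟩
              rcases List.mem_cons.1 hm with he' | hm'
              · exact h4 ⟨he', e1⟩
              · exact h2 ⟨e1, hm'⟩
            simp only [if_neg hn1, if_neg hn2, if_neg h3, if_neg h4]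

lemma pvA_outer (signatures : List (List Int)) :
    ∀ k, k ≤ signatures.length →
      pvSq signatures.length ((List.range k).foldl (pvAOuter signatures)
        (List.replicate signatures.length (List.replicate signatures.length false))) ∧
      ∀ x y, x < signatures.length → y < signatures.length →
        pvE ((List.range k).foldl (pvAOuter signatures)
          (List.replicate signatures.length (List.replicate signatures.length false))) x y =
          if x < k ∨ y < k then pvTgt signatures x y else false := by
  intro k
  induction k with
  | zero =>
    intro _
    refine ⟨⟨by simp, ?_⟩, ?_⟩
    · intro row hrow
      rw [List.eq_of_mem_replicate hrow]; simp
    · intro x y hx hy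
      simp [pvE, List.getD_eq_getElem?_getD, hx, hy]
  | succ k ih =>
    intro hk
    obtain ⟨ih1, ih2⟩ := ih (by omega)
    rw [List.range_succ, List.foldl_append, List.foldl_cons, List.foldl_nil]
    have hkn : k < signatures.length := by omega
    set M := (List.range k).foldl (pvAOuter signatures)
      (List.replicate signatures.length (List.replicate signatures.length false)) with hM
    have hM1 : pvSq signatures.length (pvUpd M k k true) := pvSq_upd _ _ _ _ _ ih1 hkn
    have hJ : ∀ j ∈ List.range' (k + 1) (signatures.length - (k + 1)),
        k < j ∧ j < signatures.length := by
      intro j hj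
      rw [List.mem_range'_1] at hj
      omega
    obtain ⟨h1, h2⟩ := pvA_inner signatures.length signatures k hkn
      (List.range' (k + 1) (signatures.length - (k + 1))) (pvUpd M k k true) hM1 hJ
    rw [show pvAOuter signatures M k =
      (List.range' (k + 1) (signatures.length - (k + 1))).foldl (pvAStep signatures k)
        (pvUpd M k k true) from rfl]
    refine ⟨h1, ?_⟩
    intro x y hx hy
    rw [h2 x y hx hy]
    have hEupd : pvE (pvUpd M k k true) x y =
        if x = k ∧ y = k then true else pvE M x y :=
      pvE_upd _ M k k true ih1 hkn hkn x y
    have hmemJ : ∀ z, z ∈ List.range' (k + 1) (signatures.length - (k + 1)) ↔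
        k < z ∧ z < signatures.length := by
      intro z
      rw [List.mem_range'_1]
      omega
    by_cases c1 : x = k ∧ y ∈ List.range' (k + 1) (signatures.length - (k + 1))
    · rw [if_pos c1, if_pos (by left; omega), c1.1]
    · rw [if_neg c1]
      by_cases c2 : y = k ∧ x ∈ List.range' (k + 1) (signatures.length - (k + 1))
      · rw [if_pos c2, if_pos (by right; omega), c2.1]
      · rw [if_neg c2, hEupd]
        by_cases c3 : x = k ∧ y = k
        · rw [if_pos c3, if_pos (by omega)]
          symm
          rw [pvTgt_iff]
          exact Or.inl (by omega)
        · rw [if_neg c3, ih2 x y hx hy]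
          by_cases c4 : x < k ∨ y < k
          · rw [if_pos c4, if_pos (by omega)]
          · rw [if_neg c4, if_neg (by
              rintro (h | h)
              · have hxk : x = k := by omega
                by_cases hyk : y = k
                · exact c3 ⟨hxk, hyk⟩
                · exact c1 ⟨hxk, (hmemJ y).2 (by omega)⟩
              · have hyk : y = k := by omega
                by_cases hxk : x = k
                · exact c3 ⟨hxk, hyk⟩
                · exact c2 ⟨hyk, (hmemJ x).2 (by omega)⟩)]

lemma pvA_char (signatures : List (List Int)) :
    pvSq signatures.length (compute_compatibility_py signatures) ∧
    ∀ x y, x < signatures.length → y < signatures.length →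
      pvE (compute_compatibility_py signatures) x y = pvTgt signatures x y := by
  obtain ⟨h1, h2⟩ := pvA_outer signatures signatures.length (le_refl _)
  rw [← pvA_eq_fold] at h1 h2
  refine ⟨h1, ?_⟩
  intro x y hx hy
  have := h2 x y hx hy
  rw [if_pos (Or.inl hx)] at this
  exact this

lemma pv_eq_of_char (n : Nat) (m1 m2 : List (List Bool))
    (h1 : pvSq n m1) (h2 : pvSq n m2)
    (he : ∀ x y, x < n → y < n → pvE m1 x y = pvE m2 x y) : m1 = m2 := by
  obtain ⟨l1, r1⟩ := h1
  obtain ⟨l2, r2⟩ := h2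
  apply List.ext_getElem (by omega)
  intro a ha1 ha2
  have hr1 : m1[a].length = n := r1 _ (List.getElem_mem ha1)
  have hr2 : m2[a].length = n := r2 _ (List.getElem_mem ha2)
  apply List.ext_getElem (by omega)
  intro b hb1 hb2
  have := he a b (by omega) (by omega)
  simp only [pvE] at this
  rwa [List.getD_eq_getElem m1 [] ha1, List.getD_eq_getElem m2 [] ha2,
    List.getD_eq_getElem _ _ hb1, List.getD_eq_getElem _ _ hb2] at this

-- ===== VERDICT (by name: the statement is the Claim_ definition above) =====
theorem compute_compatibility_py_spec : Claim_equal_compute_compatibility_py := by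
  intro signatures _
  show compute_compatibility_py signatures = compute_compatibility_py_alt signatures
  obtain ⟨ha1, ha2⟩ := pvA_char signatures
  obtain ⟨hb1, hb2⟩ := pvB_char signatures
  exact pv_eq_of_char signatures.length _ _ ha1 hb1
    (fun x y hx hy => by rw [ha2 x y hx hy, hb2 x y hx hy])
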